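-- pv_equiv track=rewrite | github.com/barthlab/ratatouille | kitchen/utils/sequence_kit.py | get_sorted_merge_indices
-- ===== SOURCE A (Python) =====
-- from typing import Callable, Generator, Iterable, Dict, Any, List, Mapping, Optional, Tuple, TypeVar
--
-- def indices2offset(indices: list[int]) -> list[int]:
--     """Converts a list of indices to a list of offsets."""
--     pad_indices = [-1, *indices]
--     return [b-a-1 for a, b in zip(pad_indices[:-1], pad_indices[1:])]
--
-- def get_sorted_merge_indices(pre_merge_dict: Dict[str, list], _convert2offset: bool = False) -> Dict[str, list[int]]:
--     """
--     Finds the indices of elements from sorted lists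
--     as they would appear in a final merged, sorted list.
--     """
--     # 1. Collect all values
--     all_values = [
--         value
--         for sorted_list in pre_merge_dict.values()
--         for value in sorted_list
--     ]
--     # 2. Sort and get unique indices
--     sorted_uniques = sorted(list(set(all_values)))
--     value_to_index_map = {
--         value: index
--         for index, value in enumerate(sorted_uniques)
--     }
--     # 3. Map back to original lists
--     output_indices = {
--         source_key: [value_to_index_map[value] for value in sorted_list]
--         for source_key, sorted_list in pre_merge_dict.items()
--     }
--     if _convert2offset:
--         output_indices = {k: indices2offset(v) for k, v in output_indices.items()}
--     return output_indices
-- ===== SOURCE B (Python) =====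
-- def get_sorted_merge_indices(pre_merge_dict, _convert2offset=False):
--     """Decorate-sort-scatter: stable-sort (position, value) pairs of the flattened
--     values by value, sweep once assigning dense ranks back into a flat rank array
--     by original position, then cut that array into the per-key segments (emitting
--     offsets on the fly if requested). No rank dictionary and no set are built."""
--     flat = [v for lst in pre_merge_dict.values() for v in lst]
--     pairs = sorted(enumerate(flat), key=lambda t: t[1])
--     ranks = [0] * len(flat)
--     r = -1
--     prev = None
--     for j, v in pairs:
--         if prev is None or v != prev:
--             r += 1
--             prev = v
--         ranks[j] = r
--     result = {}
--     pos = 0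
--     for key, lst in pre_merge_dict.items():
--         n = len(lst)
--         seg = ranks[pos:pos + n]
--         pos += n
--         if _convert2offset:
--             out = []
--             p = -1
--             for x in seg:
--                 out.append(x - p - 1)
--                 p = x
--             result[key] = out
--         else:
--             result[key] = seg
--     return result
-- ===== Notes on version B (the rewrite author's own statement) =====
-- stated objective: alternative
-- what changed: B replaces A's hash-set dedup + sorted-uniques rank dictionary + per-list remap with a decorate-sort-scatter: it stable-sorts (position, value) pairs of the flattened values, sweeps them once assigning dense ranks directly into a flat rank array by original position (no set, no dictionary, no lookups), then cuts that array into the per-key segments, emitting offsets on the fly when requested.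
import Mathlib
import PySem

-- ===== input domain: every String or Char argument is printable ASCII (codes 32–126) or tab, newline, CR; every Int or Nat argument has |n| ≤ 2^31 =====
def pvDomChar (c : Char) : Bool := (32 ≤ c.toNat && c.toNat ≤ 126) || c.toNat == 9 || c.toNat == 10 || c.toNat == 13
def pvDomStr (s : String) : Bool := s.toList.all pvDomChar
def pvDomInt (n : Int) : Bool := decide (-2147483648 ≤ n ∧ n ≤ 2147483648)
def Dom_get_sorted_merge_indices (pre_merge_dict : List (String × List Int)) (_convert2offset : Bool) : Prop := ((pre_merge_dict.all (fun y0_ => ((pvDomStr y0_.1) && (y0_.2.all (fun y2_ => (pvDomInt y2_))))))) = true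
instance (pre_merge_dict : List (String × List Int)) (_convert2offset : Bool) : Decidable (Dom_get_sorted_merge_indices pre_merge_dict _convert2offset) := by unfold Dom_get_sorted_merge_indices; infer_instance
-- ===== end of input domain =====

-- B replaces A's set-dedup + rank-dictionary + per-list remap with a decorate-sort-scatter
-- (stable sort of (position, value) pairs, one dense-rank sweep writing into a flat array,
-- then cutting the array into per-key segments); objective: alternative, same O(N log N).

-- ===== PORT A =====
-- helper indices2offset: pad = [-1, *indices]; zip(pad[:-1], pad[1:]) elementwise b-a-1
def indices2offset (indices : List Int) : List Int :=
  let pad : List Int := -1 :: indices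
  List.zipWith (fun a b => b - a - 1)
    (PySem.List.slice pad none (some (-1))) (PySem.List.slice pad (some 1) none)

-- {value: index for index, value in enumerate(sorted_uniques)} as a structural recursion
def enumInsMap (d : PySem.Dict Int Int) (i : Int) : List Int → PySem.Dict Int Int
  | [] => d
  | v :: t => enumInsMap (d.insert v i) (i + 1) t

-- dict comprehensions over pre_merge_dict.items() are maps over the pairs (a Python dict
-- has unique keys); value_to_index_map[value] is getD (the key is always present)
def get_sorted_merge_indices (pre_merge_dict : List (String × List Int)) (_convert2offset : Bool) : List (String × List Int) :=
  let all_values : List Int := pre_merge_dict.flatMap (fun p => p.2)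
  let sorted_uniques : List Int := PySem.List.sorted (PySem.Set.ofList all_values) (fun x => x)
  let value_to_index_map : PySem.Dict Int Int := enumInsMap PySem.Dict.empty 0 sorted_uniques
  let output_indices : List (String × List Int) :=
    pre_merge_dict.map (fun p => (p.1, p.2.map (fun v => value_to_index_map.getD v 0)))
  if _convert2offset then output_indices.map (fun p => (p.1, indices2offset p.2))
  else output_indices

-- ===== PORT B =====
-- the sweep `for j, v in pairs: if prev is None or v != prev: r += 1; prev = v; ranks[j] = r`
def scatterScan : List (Int × Int) → List Int → Int → Option Int → List Int
  | [], ranks, _, _ => ranks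
  | (j, v) :: t, ranks, r, prev =>
      if prev = some v then scatterScan t (PySem.List.pySetD ranks j r) r prev
      else scatterScan t (PySem.List.pySetD ranks j (r + 1)) (r + 1) (some v)

-- the offset loop: out.append(x - p - 1); p = x
def offsSeg (p : Int) : List Int → List Int
  | [] => []
  | x :: t => (x - p - 1) :: offsSeg x t

-- the final loop: seg = ranks[pos:pos+n]; pos += n; emit seg (or its offsets) under the key
def emit (conv : Bool) (ranks : List Int) : List (String × List Int) → Int → List (String × List Int)
  | [], _ => []
  | (k, lst) :: t, pos =>
      let seg := PySem.List.slice ranks (some pos) (some (pos + lst.length))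
      (k, if conv then offsSeg (-1) seg else seg) :: emit conv ranks t (pos + lst.length)

def get_sorted_merge_indices_alt (pre_merge_dict : List (String × List Int)) (_convert2offset : Bool) : List (String × List Int) :=
  let flat : List Int := pre_merge_dict.flatMap (fun p => p.2)
  let pairs : List (Int × Int) := PySem.List.sorted (PySem.List.enumerate flat) (fun t => t.2)
  let ranks : List Int := scatterScan pairs (List.replicate flat.length 0) (-1) none
  emit _convert2offset ranks pre_merge_dict 0

-- ===== PRECONDITION & SPEC =====
def Spec_get_sorted_merge_indices (pre_merge_dict : List (String × List Int)) (_convert2offset : Bool) (out : List (String × List Int)) : Prop := out = get_sorted_merge_indices_alt pre_merge_dict _convert2offset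
instance (pre_merge_dict : List (String × List Int)) (_convert2offset : Bool) (out : List (String × List Int)) : Decidable (Spec_get_sorted_merge_indices pre_merge_dict _convert2offset out) := by unfold Spec_get_sorted_merge_indices; infer_instance

-- ===== CLAIM (what is proved, stated in full; the proofs are below) =====
def Claim_equal_get_sorted_merge_indices : Prop := ∀ (pre_merge_dict : List (String × List Int)) (_convert2offset : Bool), Dom_get_sorted_merge_indices pre_merge_dict _convert2offset → Spec_get_sorted_merge_indices pre_merge_dict _convert2offset (get_sorted_merge_indices pre_merge_dict _convert2offset)

-- ===== LEMMAS AND PROOFS =====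

-- the rank A assigns to a value: its index in the sorted uniques = #{distinct u < v}
def rankIn (flat : List Int) (v : Int) : Int :=
  ((PySem.List.sorted (PySem.Set.ofList flat) (fun x => x)).countP (fun u => decide (u < v)) : Int)

-- plain scatter (writes only, ranks precomputed)
def scatterW : List (Int × Int) → List Int → List Int
  | [], a => a
  | (j, x) :: t, a => scatterW t (PySem.List.pySetD a j x)

-- offsets --------------------------------------------------------------------

lemma offsSeg_eq_zipWith : ∀ (m : List Int) (p : Int),
    offsSeg p m = List.zipWith (fun a b => b - a - 1) (p :: m) m := by
  intro m
  induction m with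
  | nil => intro p; rfl
  | cons x t ih => intro p; rw [offsSeg, ih]; simp

lemma zipWith_dropLast (g : Int → Int → Int) :
    ∀ (m : List Int) (p : Int), List.zipWith g ((p :: m).dropLast) m = List.zipWith g (p :: m) m := by
  intro m
  induction m with
  | nil => intro p; rfl
  | cons v t ih => intro p; simp only [List.dropLast_cons₂, List.zipWith_cons_cons, ih v]

lemma indices2offset_eq_offsSeg (m : List Int) : indices2offset m = offsSeg (-1) m := by
  simp only [indices2offset]
  rw [offsSeg_eq_zipWith, PySem.List.slice_to_neg_one, PySem.List.slice_from_one,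
    List.tail_cons, zipWith_dropLast]

-- A-side: characterise the rank dictionary ------------------------------------

lemma enumInsMap_getD_notmem : ∀ (l : List Int) (d : PySem.Dict Int Int) (i v : Int),
    v ∉ l → (enumInsMap d i l).getD v 0 = d.getD v 0 := by
  intro l
  induction l with
  | nil => intro d i v _; rfl
  | cons x t ih =>
    intro d i v hv
    have hvx : v ≠ x := fun h => hv (by simp [h])
    have hvt : v ∉ t := fun h => hv (List.mem_cons_of_mem _ h)
    rw [enumInsMap, ih _ _ _ hvt, PySem.Dict.getD_insert, if_neg hvx]

lemma enumInsMap_getD_mem : ∀ (l : List Int) (d : PySem.Dict Int Int) (i v : Int),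
    l.Pairwise (· < ·) → v ∈ l →
    (enumInsMap d i l).getD v 0 = i + (l.countP (fun u => decide (u < v)) : Int) := by
  intro l
  induction l with
  | nil => intro d i v _ hv; cases hv
  | cons x t ih =>
    intro d i v hp hv
    rcases List.mem_cons.mp hv with rfl | hvt
    · have hxlt : ∀ u ∈ t, v < u := (List.pairwise_cons.mp hp).1
      have hvnot : v ∉ t := fun h => lt_irrefl v (hxlt v h)
      rw [enumInsMap, enumInsMap_getD_notmem _ _ _ _ hvnot, PySem.Dict.getD_insert_self]
      have h0 : (v :: t).countP (fun u => decide (u < v)) = 0 := by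
        rw [List.countP_eq_zero]
        intro u hu
        rcases List.mem_cons.mp hu with rfl | hut
        · simp
        · simp only [decide_eq_true_eq]
          exact not_lt.mpr (le_of_lt (hxlt u hut))
      rw [h0]; simp
    · have hxlt : ∀ u ∈ t, x < u := (List.pairwise_cons.mp hp).1
      have hxv : x < v := hxlt v hvt
      rw [enumInsMap, ih _ _ _ hp.of_cons hvt, List.countP_cons]
      simp only [hxv, decide_true]
      push_cast
      ring

-- counting: one more distinct value ≤ w than < w, on a strictly sorted list containing w
lemma countP_le_eq_lt_add_one : ∀ (l : List Int) (w : Int),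
    l.Pairwise (· < ·) → w ∈ l →
    l.countP (fun u => decide (u ≤ w)) = l.countP (fun u => decide (u < w)) + 1 := by
  intro l
  induction l with
  | nil => intro w _ hw; cases hw
  | cons x t ih =>
    intro w hp hw
    have hxlt : ∀ u ∈ t, x < u := (List.pairwise_cons.mp hp).1
    rcases List.mem_cons.mp hw with rfl | hwt
    · have h1 : t.countP (fun u => decide (u ≤ w)) = 0 := by
        rw [List.countP_eq_zero]; intro u hu
        simp only [decide_eq_true_eq]
        exact not_le.mpr (hxlt u hu)
      have h2 : t.countP (fun u => decide (u < w)) = 0 := by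
        rw [List.countP_eq_zero]; intro u hu
        simp only [decide_eq_true_eq]
        exact not_lt.mpr (le_of_lt (hxlt u hu))
      rw [List.countP_cons, List.countP_cons, h1, h2]; simp
    · have hxw : x < w := hxlt w hwt
      rw [List.countP_cons, List.countP_cons, ih _ hp.of_cons hwt]
      simp only [le_of_lt hxw, hxw, decide_true]
      omega

-- scatter: permutation invariance ---------------------------------------------

lemma pySetD_comm (a : List Int) (j j' v v' : Int) (hj : 0 ≤ j) (hj' : 0 ≤ j')
    (hne : j ≠ j') :
    PySem.List.pySetD (PySem.List.pySetD a j v) j' v'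
      = PySem.List.pySetD (PySem.List.pySetD a j' v') j v := by
  rw [PySem.List.pySetD_of_nonneg a v hj, PySem.List.pySetD_of_nonneg _ v' hj',
    PySem.List.pySetD_of_nonneg a v' hj', PySem.List.pySetD_of_nonneg _ v hj]
  exact List.set_comm _ _ (by omega)

lemma scatterW_perm : ∀ {ws ws' : List (Int × Int)}, ws.Perm ws' →
    (ws.map (·.1)).Nodup → (∀ q ∈ ws, 0 ≤ q.1) →
    ∀ (a : List Int), scatterW ws a = scatterW ws' a := by
  intro ws ws' hperm
  induction hperm with
  | nil => intro _ _ a; rfl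
  | cons x h ih =>
    intro hnd hnn a
    obtain ⟨j, v⟩ := x
    simp only [scatterW]
    exact ih (by simpa using hnd.of_cons)
      (fun q hq => hnn q (List.mem_cons_of_mem _ hq)) _
  | swap x y l =>
    intro hnd hnn a
    obtain ⟨j, v⟩ := x
    obtain ⟨j', v'⟩ := y
    simp only [scatterW]
    have h1 : (0 : Int) ≤ j' := hnn (j', v') (by simp)
    have h2 : (0 : Int) ≤ j := hnn (j, v) (by simp)
    have hne : j' ≠ j := by
      intro h
      simp only [List.map_cons, List.nodup_cons, List.mem_cons] at hnd
      exact hnd.1 (Or.inl h)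
    rw [pySetD_comm a j' j v' v h1 h2 hne]
  | trans h1 h2 ih1 ih2 =>
    intro hnd hnn a
    rw [ih1 hnd hnn a]
    exact ih2 ((h1.map (·.1)).nodup_iff.mp hnd)
      (fun q hq => hnn q (h1.symm.subset hq)) a

-- scatter of the writes in original order -------------------------------------

lemma take_set (a : List Int) : ∀ (s : Nat) (x : Int), s < a.length →
    (a.set s x).take (s + 1) = a.take s ++ [x] := by
  induction a with
  | nil => intro s x h; cases h
  | cons y t ih =>
    intro s x h
    cases s with
    | zero => simp
    | succ n =>
      simp only [List.set_cons_succ, List.take_succ_cons, List.cons_append]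
      rw [ih n x (by simpa using h)]

lemma scatterW_enum (g : Int → Int) : ∀ (l : List Int) (s : Nat) (a : List Int),
    a.length = s + l.length →
    scatterW ((PySem.List.enumerate l (s : Int)).map (fun q => (q.1, g q.2))) a
      = a.take s ++ l.map g := by
  intro l
  induction l with
  | nil =>
    intro s a hlen
    simp only [PySem.List.enumerate_nil, List.map_nil, scatterW, List.map_nil,
      List.append_nil]
    exact (List.take_of_length_le (le_of_eq (by simpa using hlen))).symm
  | cons x t ih =>
    intro s a hlen
    rw [PySem.List.enumerate_cons]
    simp only [List.map_cons, scatterW]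
    have hs : s < a.length := by simp at hlen; omega
    have hset : PySem.List.pySetD a (s : Int) (g x) = a.set s (g x) := by
      simp
    rw [hset]
    have : ((s : Int) + 1) = ((s + 1 : Nat) : Int) := by push_cast; ring
    rw [this, ih (s + 1) (a.set s (g x)) (by simp at hlen ⊢; omega)]
    rw [take_set a s (g x) hs]
    simp

-- the dense-rank sweep assigns rankIn -----------------------------------------

lemma scatterScan_eq (flat : List Int) : ∀ (L : List (Int × Int)) (a : List Int) (w : Int),
    L.Pairwise (fun p q => p.2 ≤ q.2) →
    (∀ q ∈ L, w ≤ q.2) →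
    (∀ q ∈ L, q.2 ∈ flat) →
    (∀ u ∈ flat, w < u → u ∈ L.map (·.2)) →
    w ∈ flat →
    scatterScan L a (rankIn flat w) (some w)
      = scatterW (L.map (fun q => (q.1, rankIn flat q.2))) a := by
  intro L
  induction L with
  | nil => intro a w _ _ _ _ _; rfl
  | cons q T ih =>
    intro a w hp hge hmem hcov hw
    obtain ⟨j, v⟩ := q
    have hwv : w ≤ v := hge _ List.mem_cons_self
    by_cases hv : v = w
    · subst hv
      simp only [scatterScan, List.map_cons, scatterW]
      exact ih _ _ hp.of_cons (fun q hq => hge q (List.mem_cons_of_mem _ hq))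
        (fun q hq => hmem q (List.mem_cons_of_mem _ hq))
        (fun u hu hlt => by
          rcases List.mem_cons.mp (hcov u hu hlt) with h | h
          · exact absurd h (ne_of_gt hlt)
          · exact h) hw
    · have hwlt : w < v := lt_of_le_of_ne hwv (fun h => hv h.symm)
      have hvflat : v ∈ flat := hmem _ List.mem_cons_self
      -- f v = f w + 1
      have hsu_pl : (PySem.List.sorted (PySem.Set.ofList flat) (fun x => x)).Pairwise (· < ·) :=
        PySem.List.sorted_ofList_pairwise_lt flat
      have hwsu : w ∈ PySem.List.sorted (PySem.Set.ofList flat) (fun x => x) := by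
        rw [PySem.List.mem_sorted, PySem.Set.mem_ofList]; exact hw
      have hiff : ∀ u ∈ PySem.List.sorted (PySem.Set.ofList flat) (fun x => x),
          (decide (u < v) = true ↔ decide (u ≤ w) = true) := by
        intro u hu
        have huflat : u ∈ flat := by
          rw [PySem.List.mem_sorted, PySem.Set.mem_ofList] at hu; exact hu
        simp only [decide_eq_true_eq]
        constructor
        · intro hult
          by_contra hle
          rw [not_le] at hle
          rcases List.mem_cons.mp (hcov u huflat hle) with h | h
          · exact absurd h (ne_of_lt hult)
          · rcases List.mem_map.mp h with ⟨q, hqT, hq2⟩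
            have := (List.pairwise_cons.mp hp).1 q hqT
            simp only at this
            rw [hq2] at this
            exact absurd hult (not_lt.mpr this)
        · intro hle; exact lt_of_le_of_lt hle hwlt
      have hbump : rankIn flat v = rankIn flat w + 1 := by
        unfold rankIn
        rw [List.countP_congr hiff,
          countP_le_eq_lt_add_one _ _ hsu_pl hwsu]
        push_cast; ring
      simp only [scatterScan, List.map_cons, scatterW,
        if_neg (by simpa using Ne.symm hv : ¬ (some w = some v))]
      rw [← hbump]
      exact ih _ _ hp.of_cons
        (fun q hq => (List.pairwise_cons.mp hp).1 q hq)
        (fun q hq => hmem q (List.mem_cons_of_mem _ hq))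
        (fun u hu hlt => by
          rcases List.mem_cons.mp (hcov u hu (lt_trans hwlt hlt)) with h | h
          · exact absurd h (ne_of_gt hlt)
          · exact h) hvflat

lemma scatterScan_top (flat : List Int) (a : List Int) :
    scatterScan (PySem.List.sorted (PySem.List.enumerate flat) (fun t => t.2)) a (-1) none
      = scatterW ((PySem.List.sorted (PySem.List.enumerate flat) (fun t => t.2)).map
          (fun q => (q.1, rankIn flat q.2))) a := by
  have hperm : (PySem.List.sorted (PySem.List.enumerate flat) (fun t => t.2)).Perm
      (PySem.List.enumerate flat) := PySem.List.sorted_perm _ _ _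
  have hsndmem : ∀ u, u ∈ (PySem.List.sorted (PySem.List.enumerate flat)
      (fun t => t.2)).map (·.2) ↔ u ∈ flat := by
    intro u
    rw [List.Perm.mem_iff (hperm.map (·.2)), PySem.List.map_snd_enumerate]
  cases hsp : PySem.List.sorted (PySem.List.enumerate flat) (fun t => t.2) with
  | nil => rfl
  | cons q T =>
    obtain ⟨j, v⟩ := q
    have hp : ((j, v) :: T).Pairwise (fun p q : Int × Int => p.2 ≤ q.2) := by
      rw [← hsp]; exact PySem.List.sorted_pairwise _ _
    have hmemflat : ∀ q ∈ (j, v) :: T, (q : Int × Int).2 ∈ flat := by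
      intro q hq
      rw [← hsndmem q.2, hsp]
      exact List.mem_map.mpr ⟨q, hq, rfl⟩
    have hvflat : v ∈ flat := hmemflat _ List.mem_cons_self
    have hvmin : ∀ u ∈ flat, v ≤ u := by
      intro u hu
      rw [← hsndmem u, hsp] at hu
      rcases List.mem_map.mp hu with ⟨q, hqm, hq2⟩
      rcases List.mem_cons.mp hqm with rfl | hqT
      · exact le_of_eq hq2
      · have := (List.pairwise_cons.mp hp).1 q hqT
        rw [hq2] at this; exact this
    have h0 : rankIn flat v = 0 := by
      unfold rankIn
      have : (PySem.List.sorted (PySem.Set.ofList flat) (fun x => x)).countP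
          (fun u => decide (u < v)) = 0 := by
        rw [List.countP_eq_zero]
        intro u hu
        have : u ∈ flat := by
          rw [PySem.List.mem_sorted, PySem.Set.mem_ofList] at hu; exact hu
        simp only [decide_eq_true_eq]
        exact not_lt.mpr (hvmin u this)
      rw [this]; simp
    simp only [scatterScan, List.map_cons, scatterW, if_neg (by simp : ¬ ((none : Option Int) = some v))]
    have h01 : (-1 : Int) + 1 = rankIn flat v := by rw [h0]; decide
    rw [h01]
    exact scatterScan_eq flat T _ v hp.of_cons
      (fun q hq => (List.pairwise_cons.mp hp).1 q hq)
      (fun q hq => hmemflat q (List.mem_cons_of_mem _ hq))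
      (fun u hu hlt => by
        have hm : u ∈ ((j, v) :: T).map (·.2) := by
          have := (hsndmem u).mpr hu
          rw [hsp] at this; exact this
        rcases List.mem_cons.mp hm with h | h
        · exact absurd h (ne_of_gt hlt)
        · exact h) hvflat

-- cutting the flat rank array back into per-key segments -----------------------

lemma emit_eq (c : Bool) (g : Int → Int) : ∀ (l : List (String × List Int)) (pref : List Int),
    emit c (pref ++ (l.flatMap (fun p => p.2)).map g) l (pref.length : Int)
      = l.map (fun p => (p.1, if c then offsSeg (-1) (p.2.map g) else p.2.map g)) := by
  intro l
  induction l with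
  | nil => intro pref; rfl
  | cons p t ih =>
    intro pref
    obtain ⟨k, lst⟩ := p
    simp only [List.flatMap_cons, List.map_append, emit]
    have hseg : PySem.List.slice (pref ++ (lst.map g ++ (t.flatMap (fun p => p.2)).map g))
        (some (pref.length : Int)) (some ((pref.length : Int) + lst.length)) = lst.map g := by
      rw [PySem.List.slice_toNat _ (by positivity) (by positivity)]
      have h1 : ((pref.length : Int)).toNat = pref.length := by omega
      have h2 : (((pref.length : Int)) + lst.length).toNat = pref.length + lst.length := by omega
      have h3 : pref.length + lst.length - pref.length = lst.length := by omega
      rw [h1, h2, List.drop_left' (l₁ := pref) rfl, h3, List.take_left' (by simp)]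
    rw [hseg]
    have hrec : emit c (pref ++ (lst.map g ++ (t.flatMap (fun p => p.2)).map g)) t
        ((pref.length : Int) + lst.length)
        = t.map (fun p => (p.1, if c then offsSeg (-1) (p.2.map g) else p.2.map g)) := by
      have := ih (pref ++ lst.map g)
      rw [List.append_assoc] at this
      simpa using this
    rw [hrec]
    rfl

-- perm/nodup facts for the sorted pair list ------------------------------------

lemma sorted_enum_keys_nodup (flat : List Int) :
    (((PySem.List.sorted (PySem.List.enumerate flat) (fun t => t.2)).map
      (fun q => (q.1, rankIn flat q.2))).map (·.1)).Nodup := by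
  have hperm : (PySem.List.sorted (PySem.List.enumerate flat) (fun t => t.2)).Perm
      (PySem.List.enumerate flat) := PySem.List.sorted_perm _ _ _
  have h1 : ((PySem.List.sorted (PySem.List.enumerate flat) (fun t => t.2)).map
      (fun q => (q.1, rankIn flat q.2))).map (·.1)
      = (PySem.List.sorted (PySem.List.enumerate flat) (fun t => t.2)).map (·.1) := by
    simp [List.map_map, Function.comp]
  rw [h1]
  apply (hperm.map (·.1)).nodup_iff.mpr
  exact List.Pairwise.map (fun p : Int × Int => p.1) (fun a b h => ne_of_lt h)
    (PySem.List.pairwise_lt_enumerate flat 0)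

lemma sorted_enum_keys_nonneg (flat : List Int) :
    ∀ q ∈ (PySem.List.sorted (PySem.List.enumerate flat) (fun t => t.2)).map
      (fun q => (q.1, rankIn flat q.2)), 0 ≤ q.1 := by
  intro q hq
  rcases List.mem_map.mp hq with ⟨p, hp, rfl⟩
  have : p ∈ PySem.List.enumerate flat :=
    (PySem.List.sorted_perm _ _ _).subset hp
  rcases (PySem.List.mem_enumerate_iff flat 0 p).mp this with ⟨k, hk, rfl⟩
  simp

-- ===== VERDICT (by name: the statement is the Claim_ definition above) =====
theorem get_sorted_merge_indices_spec : Claim_equal_get_sorted_merge_indices := by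
  intro pre c _dom
  simp only [Spec_get_sorted_merge_indices, get_sorted_merge_indices, get_sorted_merge_indices_alt]
  set flat := pre.flatMap (fun p => p.2) with hflat
  -- B side: reduce to pre.map with rankIn
  rw [scatterScan_top flat]
  rw [scatterW_perm ((PySem.List.sorted_perm (PySem.List.enumerate flat) (fun t => t.2) false).map
      (fun q => (q.1, rankIn flat q.2)))
    (sorted_enum_keys_nodup flat) (sorted_enum_keys_nonneg flat)
    (List.replicate flat.length 0)]
  have henum : scatterW ((PySem.List.enumerate flat).map (fun q => (q.1, rankIn flat q.2)))
      (List.replicate flat.length 0) = flat.map (rankIn flat) := by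
    have h := scatterW_enum (rankIn flat) flat 0 (List.replicate flat.length 0) (by simp)
    simpa using h
  rw [henum]
  have hemit : emit c (flat.map (rankIn flat)) pre 0
      = pre.map (fun p => (p.1, if c then offsSeg (-1) (p.2.map (rankIn flat))
          else p.2.map (rankIn flat))) := by
    have := emit_eq c (rankIn flat) pre []
    simpa using this
  rw [hemit]
  -- A side: pointwise ranks agree
  have hlook : ∀ v ∈ flat,
      (enumInsMap PySem.Dict.empty 0
        (PySem.List.sorted (PySem.Set.ofList flat) (fun x => x))).getD v 0 = rankIn flat v := by
    intro v hv
    have hvsu : v ∈ PySem.List.sorted (PySem.Set.ofList flat) (fun x => x) := by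
      rw [PySem.List.mem_sorted, PySem.Set.mem_ofList]; exact hv
    rw [enumInsMap_getD_mem _ _ _ _ (PySem.List.sorted_ofList_pairwise_lt flat) hvsu]
    unfold rankIn
    omega
  cases c with
  | false =>
    simp only [Bool.false_eq_true, if_false]
    apply List.map_congr_left
    intro p hp
    congr 1
    apply List.map_congr_left
    intro v hv
    exact hlook v (List.mem_flatMap.mpr ⟨p, hp, hv⟩)
  | true =>
    simp only [List.map_map]
    apply List.map_congr_left
    intro p hp
    simp only [Function.comp]
    have hinner : p.2.map (fun v =>
        (enumInsMap PySem.Dict.empty 0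
          (PySem.List.sorted (PySem.Set.ofList flat) (fun x => x))).getD v 0)
        = p.2.map (rankIn flat) := by
      apply List.map_congr_left
      intro v hv
      exact hlook v (List.mem_flatMap.mpr ⟨p, hp, hv⟩)
    rw [hinner, indices2offset_eq_offsSeg]
    simp
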